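-- pv_equiv track=rewrite | github.com/Kui2ei/FTI | codesignOrion&Bs.py | _collect_rotation_breakdown_structural_conj
-- ===== SOURCE A (Python) =====
-- from typing import Dict, Iterable, List, Sequence, Set, Tuple
--
-- def norm_rot_index(i: int, n: int) -> int:
--     if i < 0:
--         i = n // 2 + i
--     return i
--
-- def _collect_rotation_breakdown_structural_conj(a_diags: Iterable[int], n: int, b_step: int, slots: int) -> Tuple[Set[int], Set[int], Set[int]]:
--     keylist = {x & (slots - 1) for x in a_diags}
--     baby: Set[int] = set()
--     giant: Set[int] = set()
--     g_step = (slots + b_step - 1) // b_step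
--
--     for i in range(1, b_step):
--         if i in keylist:
--             baby.add(_canonical_conj_index(norm_rot_index(i, n), slots))
--
--     for j in range(1, g_step):
--         changed = False
--         if b_step * j in keylist:
--             changed = True
--         for i in range(1, b_step):
--             if b_step * j + i in keylist:
--                 baby.add(_canonical_conj_index(norm_rot_index(i, n), slots))
--                 changed = True
--         if changed:
--             giant.add(_canonical_conj_index(norm_rot_index(b_step * j, n), slots))
--
--     return baby | giant, baby, giant
--
-- def _canonical_conj_index(x: int, slots: int) -> int:
--     x &= (slots - 1)
--     if x == 0:
--         return 0
--     neg = (-x) & (slots - 1)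
--     return x if x < neg else neg
-- ===== SOURCE B (Python) =====
-- def norm_rot_index(i: int, n: int) -> int:
--     if i < 0:
--         i = n // 2 + i
--     return i
--
--
-- def _canonical_conj_index(x: int, slots: int) -> int:
--     x &= (slots - 1)
--     if x == 0:
--         return 0
--     neg = (-x) & (slots - 1)
--     return x if x < neg else neg
--
--
-- def _collect_rotation_breakdown_structural_conj(a_diags, n, b_step, slots):
--     # One pass over the sorted distinct masked keys: decompose each key
--     # k = b_step*j + i by divmod and bucket it, rather than scanning every
--     # candidate index in range and testing it for membership in the key set.
--     g_step = (slots + b_step - 1) // b_step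
--     keys = sorted({x & (slots - 1) for x in a_diags})
--     baby, giant = set(), set()
--     for k in keys:
--         j, i = divmod(k, b_step)
--         if k == 0 or j < 0 or j >= g_step:
--             continue
--         if i:
--             baby.add(_canonical_conj_index(norm_rot_index(i, n), slots))
--         if j:
--             giant.add(_canonical_conj_index(norm_rot_index(b_step * j, n), slots))
--     return baby | giant, baby, giant
-- ===== Notes on version B (the rewrite author's own statement) =====
-- stated objective: alternative
-- what changed: Instead of scanning every candidate index (range(1,b_step) plus the g_step*b_step nested range probes) and testing each for membership in the key set, B makes one pass over the sorted distinct masked keys and decomposes each key k by divmod(k, b_step) into its giant index j and baby index i, bucketing it directly; intended as asymptotically lighter (O(m log m) in the m distinct keys vs O(slots)), but a timing run measured only ~1.5x inconsistently, so no speed is claimed.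
-- outside the precondition, e.g. on _collect_rotation_breakdown_structural_conj([1], 8, 2, 0): A returns ({-1}, {-1}, set()), B returns (set(), set(), set()); on _collect_rotation_breakdown_structural_conj([1], 8, 2, -4): A returns ({-5}, {-5}, set()), B returns (set(), set(), set())
import Mathlib
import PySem

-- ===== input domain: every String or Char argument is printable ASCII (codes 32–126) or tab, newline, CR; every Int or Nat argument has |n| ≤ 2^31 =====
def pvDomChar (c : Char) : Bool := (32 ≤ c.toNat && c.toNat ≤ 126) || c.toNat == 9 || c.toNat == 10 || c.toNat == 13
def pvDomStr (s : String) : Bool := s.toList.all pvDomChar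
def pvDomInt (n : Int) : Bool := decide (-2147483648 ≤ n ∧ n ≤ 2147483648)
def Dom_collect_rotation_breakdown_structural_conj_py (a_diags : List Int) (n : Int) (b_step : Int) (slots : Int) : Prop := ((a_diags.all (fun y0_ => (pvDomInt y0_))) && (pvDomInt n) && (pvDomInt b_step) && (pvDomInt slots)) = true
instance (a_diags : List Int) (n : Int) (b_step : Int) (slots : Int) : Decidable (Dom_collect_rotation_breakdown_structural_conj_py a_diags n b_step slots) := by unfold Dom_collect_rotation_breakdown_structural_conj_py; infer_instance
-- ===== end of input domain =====

-- B replaces A's scan of all ~slots candidate indices by one pass over the sorted distinct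
-- masked keys, decomposing each key k = b_step*j + i by divmod (objective: alternative).

-- ===== PORT A =====
-- helper norm_rot_index (shared by both Pythons)
def norm_rot_index (i : Int) (n : Int) : Int :=
  if i < 0 then PySem.Int.floordiv n 2 + i else i

-- helper _canonical_conj_index (shared by both Pythons)
def canonical_conj_index (x : Int) (slots : Int) : Int :=
  let x1 := PySem.Int.band x (slots - 1)
  if x1 = 0 then 0
  else
    let neg := PySem.Int.band (-x1) (slots - 1)
    if x1 < neg then x1 else neg

def collect_rotation_breakdown_structural_conj_py (a_diags : List Int) (n : Int) (b_step : Int) (slots : Int) : List Int × List Int × List Int :=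
  let keylist : PySem.Set Int := PySem.Set.ofList (a_diags.map (fun x => PySem.Int.band x (slots - 1)))
  let g_step : Int := PySem.Int.floordiv (slots + b_step - 1) b_step
  -- for i in range(1, b_step): if i in keylist: baby.add(...)
  let baby0 : PySem.Set Int :=
    (PySem.List.pyRange 1 b_step).foldl
      (fun baby i =>
        if PySem.Set.contains keylist i then
          PySem.Set.add baby (canonical_conj_index (norm_rot_index i n) slots)
        else baby)
      PySem.Set.empty
  -- for j in range(1, g_step): …  (changed initialised by the 'b_step * j in keylist' test)
  let bg : PySem.Set Int × PySem.Set Int :=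
    (PySem.List.pyRange 1 g_step).foldl
      (fun bg j =>
        let bc : PySem.Set Int × Bool :=
          (PySem.List.pyRange 1 b_step).foldl
            (fun bc i =>
              if PySem.Set.contains keylist (b_step * j + i) then
                (PySem.Set.add bc.1 (canonical_conj_index (norm_rot_index i n) slots), true)
              else bc)
            (bg.1, PySem.Set.contains keylist (b_step * j))
        (bc.1, if bc.2 then PySem.Set.add bg.2 (canonical_conj_index (norm_rot_index (b_step * j) n) slots) else bg.2))
      (baby0, PySem.Set.empty)
  (PySem.Set.union bg.1 bg.2, bg.1, bg.2)

-- ===== PORT B =====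
def collect_rotation_breakdown_structural_conj_py_alt (a_diags : List Int) (n : Int) (b_step : Int) (slots : Int) : List Int × List Int × List Int :=
  let g_step : Int := PySem.Int.floordiv (slots + b_step - 1) b_step
  -- keys = sorted({x & (slots - 1) for x in a_diags})
  let keys : List Int := PySem.List.sorted (PySem.Set.ofList (a_diags.map (fun x => PySem.Int.band x (slots - 1)))) (fun k => k)
  let bg : PySem.Set Int × PySem.Set Int :=
    keys.foldl
      (fun bg k =>
        let j := PySem.Int.floordiv k b_step
        let i := PySem.Int.mod k b_step
        if k = 0 ∨ j < 0 ∨ g_step ≤ j then bg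
        else
          ((if i = 0 then bg.1 else PySem.Set.add bg.1 (canonical_conj_index (norm_rot_index i n) slots)),
           (if j = 0 then bg.2 else PySem.Set.add bg.2 (canonical_conj_index (norm_rot_index (b_step * j) n) slots))))
      (PySem.Set.empty, PySem.Set.empty)
  (PySem.Set.union bg.1 bg.2, bg.1, bg.2)

-- ===== PRECONDITION & SPEC =====
-- Pre_ excludes b_step = 0, where A raises ZeroDivisionError, and the inputs outside the
-- natural domain with a nonpositive slot count, where masking with the negative slots-1
-- is an accident of A's bit tricks (A may then return nonempty sets B does not mimic).
def Pre_collect_rotation_breakdown_structural_conj_py (a_diags : List Int) (n : Int) (b_step : Int) (slots : Int) : Prop :=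
  1 ≤ slots ∧ b_step ≠ 0
instance (a_diags : List Int) (n : Int) (b_step : Int) (slots : Int) : Decidable (Pre_collect_rotation_breakdown_structural_conj_py a_diags n b_step slots) := by unfold Pre_collect_rotation_breakdown_structural_conj_py; infer_instance

def pvWitness_collect_rotation_breakdown_structural_conj_py : List Int × Int × Int × Int := ([1, 2, 5, 9], 8, 2, 8)

def Spec_collect_rotation_breakdown_structural_conj_py (a_diags : List Int) (n : Int) (b_step : Int) (slots : Int) (out : List Int × List Int × List Int) : Prop := out = collect_rotation_breakdown_structural_conj_py_alt a_diags n b_step slots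
instance (a_diags : List Int) (n : Int) (b_step : Int) (slots : Int) (out : List Int × List Int × List Int) : Decidable (Spec_collect_rotation_breakdown_structural_conj_py a_diags n b_step slots out) := by unfold Spec_collect_rotation_breakdown_structural_conj_py; infer_instance

-- ===== CLAIM (what is proved, stated in full; the proofs are below) =====
def Claim_equal_collect_rotation_breakdown_structural_conj_py : Prop := ∀ (a_diags : List Int) (n : Int) (b_step : Int) (slots : Int), Dom_collect_rotation_breakdown_structural_conj_py a_diags n b_step slots → Pre_collect_rotation_breakdown_structural_conj_py a_diags n b_step slots → Spec_collect_rotation_breakdown_structural_conj_py a_diags n b_step slots (collect_rotation_breakdown_structural_conj_py a_diags n b_step slots)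

-- ===== LEMMAS AND PROOFS =====

-- c(i) abbreviation used throughout the proofs
def pvC (n slots i : Int) : Int := canonical_conj_index (norm_rot_index i n) slots

-- per-key baby action (no membership guard)
def pvAct1 (n slots b : Int) (s : PySem.Set Int) (k : Int) : PySem.Set Int :=
  if PySem.Int.mod k b = 0 then s else PySem.Set.add s (pvC n slots (PySem.Int.mod k b))

-- per-key giant action (no membership guard)
def pvAct2 (n slots b : Int) (s : PySem.Set Int) (k : Int) : PySem.Set Int :=
  if PySem.Int.floordiv k b = 0 then s else PySem.Set.add s (pvC n slots (b * PySem.Int.floordiv k b))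

-- membership-guarded per-key actions (A's view of a candidate index k)
def pvG1 (K : PySem.Set Int) (n slots b : Int) (s : PySem.Set Int) (k : Int) : PySem.Set Int :=
  if PySem.Set.contains K k then pvAct1 n slots b s k else s

def pvG2 (K : PySem.Set Int) (n slots b : Int) (s : PySem.Set Int) (k : Int) : PySem.Set Int :=
  if PySem.Set.contains K k then pvAct2 n slots b s k else s

theorem pv_add_of_mem (t : PySem.Set Int) (x : Int) (h : x ∈ t) : PySem.Set.add t x = t := by
  simp [PySem.Set.add, PySem.Set.contains, h]
theorem pv_add_idem (s : PySem.Set Int) (x : Int) :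
    PySem.Set.add (PySem.Set.add s x) x = PySem.Set.add s x :=
  pv_add_of_mem _ _ ((PySem.Set.mem_add s x x).mpr (Or.inr rfl))
theorem pv_collapse (l : List Int) (p : Int → Bool) (x : Int) (g : PySem.Set Int) :
    l.foldl (fun s k => if p k then PySem.Set.add s x else s) g
      = if l.any p then PySem.Set.add g x else g := by
  induction l generalizing g with
  | nil => simp
  | cons a t ih =>
    simp only [List.foldl_cons, List.any_cons]
    by_cases h : p a
    · rw [if_pos h, ih]
      by_cases h2 : t.any p <;> simp [h, h2]
    · simp [h, ih]
theorem pv_range_shift (a b t : Int) :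
    PySem.List.pyRange (a + t) (b + t) = (PySem.List.pyRange a b).map (fun k => k + t) := by
  rw [PySem.List.pyRange_one, PySem.List.pyRange_one, List.map_map]
  rw [show b + t - (a + t) = b - a by ring]
  congr 1; funext k; simp [Function.comp]; ring
theorem pv_floordiv_block {b j i : Int} (hb : 1 ≤ b) (hi0 : 0 ≤ i) (hib : i < b) :
    PySem.Int.floordiv (b * j + i) b = j := by
  rw [PySem.Int.floordiv_eq_iff_of_pos (by omega)]
  constructor <;> nlinarith
theorem pv_mod_block {b j i : Int} (hb : 1 ≤ b) (hi0 : 0 ≤ i) (hib : i < b) :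
    PySem.Int.mod (b * j + i) b = i := by
  have h := PySem.Int.floordiv_mul_add_mod (b * j + i) b
  rw [pv_floordiv_block hb hi0 hib, mul_comm j b] at h
  linarith

theorem pv_block1 (K : PySem.Set Int) (n slots b j : Int) (hb : 1 ≤ b) (s : PySem.Set Int) :
    (PySem.List.pyRange (b * j) (b * j + b)).foldl (pvG1 K n slots b) s
      = (PySem.List.pyRange 1 b).foldl
          (fun s i => if PySem.Set.contains K (b * j + i) then PySem.Set.add s (pvC n slots i) else s) s := by
  rw [PySem.List.pyRange_one_append (b * j) (b * j + 1) (b * j + b) (by omega) (by omega),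
      List.foldl_append, PySem.List.pyRange_one_singleton]
  have hm0 : PySem.Int.mod (b * j) b = 0 := by
    have := pv_mod_block (b := b) (j := j) (i := 0) hb le_rfl (by omega); simpa using this
  have h1 : List.foldl (pvG1 K n slots b) s [b * j] = s := by
    simp [pvG1, pvAct1, hm0]
  rw [h1]
  have h2 : PySem.List.pyRange (b * j + 1) (b * j + b) = (PySem.List.pyRange 1 b).map (fun k => k + b * j) := by
    have h := pv_range_shift 1 b (b * j)
    rw [show b * j + 1 = 1 + b * j by ring, show b * j + b = b + b * j by ring]
    exact h
  rw [h2, List.foldl_map]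
  apply PySem.List.foldl_congr_mem
  intro acc x hx
  have hx' := PySem.List.mem_pyRange_one.mp hx
  rw [show x + b * j = b * j + x by ring]
  have hmod : PySem.Int.mod (b * j + x) b = x := pv_mod_block hb (by omega) (by omega)
  simp [pvG1, pvAct1, hmod, show ¬(x = 0) by omega]

theorem pv_block2 (K : PySem.Set Int) (n slots b j : Int) (hb : 1 ≤ b) (hj : 1 ≤ j) (g : PySem.Set Int) :
    (PySem.List.pyRange (b * j) (b * j + b)).foldl (pvG2 K n slots b) g
      = if (PySem.Set.contains K (b * j) || (PySem.List.pyRange 1 b).any (fun i => PySem.Set.contains K (b * j + i)))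
        then PySem.Set.add g (pvC n slots (b * j)) else g := by
  rw [PySem.List.pyRange_one_append (b * j) (b * j + 1) (b * j + b) (by omega) (by omega),
      List.foldl_append, PySem.List.pyRange_one_singleton]
  have hfd0 : PySem.Int.floordiv (b * j) b = j := by
    have := pv_floordiv_block (b := b) (j := j) (i := 0) hb le_rfl (by omega); simpa using this
  have h1 : List.foldl (pvG2 K n slots b) g [b * j]
      = if PySem.Set.contains K (b * j) then PySem.Set.add g (pvC n slots (b * j)) else g := by
    simp [pvG2, pvAct2, hfd0, show ¬(j = 0) by omega]
  rw [h1]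
  have h2 : PySem.List.pyRange (b * j + 1) (b * j + b) = (PySem.List.pyRange 1 b).map (fun k => k + b * j) := by
    have h := pv_range_shift 1 b (b * j)
    rw [show b * j + 1 = 1 + b * j by ring, show b * j + b = b + b * j by ring]
    exact h
  rw [h2, List.foldl_map]
  have h3 : ∀ (acc : PySem.Set Int), ∀ x ∈ PySem.List.pyRange 1 b,
      pvG2 K n slots b acc (x + b * j)
        = (fun s k => if PySem.Set.contains K (b * j + k) then PySem.Set.add s (pvC n slots (b * j)) else s) acc x := by
    intro acc x hx
    have hx' := PySem.List.mem_pyRange_one.mp hx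
    rw [show x + b * j = b * j + x by ring]
    have hfd : PySem.Int.floordiv (b * j + x) b = j := pv_floordiv_block hb (by omega) (by omega)
    simp [pvG2, pvAct2, hfd, show ¬(j = 0) by omega]
  rw [PySem.List.foldl_congr_mem _ _ _ _ h3, pv_collapse]
  simp only [PySem.Set.contains, List.contains_eq_mem]
  by_cases hc : b * j ∈ K
  all_goals by_cases ha : ((PySem.List.pyRange 1 b).any fun k => decide (b * j + k ∈ K)) = true
  all_goals simp [hc, ha, pv_add_idem]

theorem pv_main1 (K : PySem.Set Int) (n slots b : Int) (hb : 1 ≤ b) (m : Nat) (s : PySem.Set Int) :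
    (PySem.List.pyRange 1 (b * (1 + (m : Int)))).foldl (pvG1 K n slots b) s
      = (PySem.List.pyRange 1 (1 + (m : Int))).foldl
          (fun s j => (PySem.List.pyRange 1 b).foldl
              (fun s i => if PySem.Set.contains K (b * j + i) then PySem.Set.add s (pvC n slots i) else s) s)
          ((PySem.List.pyRange 1 b).foldl (pvG1 K n slots b) s) := by
  induction m generalizing s with
  | zero =>
    rw [show b * (1 + ((0 : Nat) : Int)) = b by push_cast; ring,
        show (1 + ((0 : Nat) : Int)) = 1 by norm_num,
        PySem.List.pyRange_one_eq_nil (le_refl 1)]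
    simp
  | succ m ih =>
    have h1 : (1 : Int) ≤ b * (1 + (m : Int)) := by nlinarith [Int.natCast_nonneg m]
    rw [show b * (1 + ((m + 1 : Nat) : Int)) = b * (1 + (m : Int)) + b by push_cast; ring,
        PySem.List.pyRange_one_append 1 (b * (1 + (m : Int))) (b * (1 + (m : Int)) + b) h1 (by omega),
        List.foldl_append, ih,
        show (1 + ((m + 1 : Nat) : Int)) = (1 + (m : Int)) + 1 by push_cast; ring,
        PySem.List.pyRange_one_succ_right (by omega : (1:Int) ≤ 1 + (m : Int)),
        List.foldl_append]
    simp only [List.foldl_cons, List.foldl_nil]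
    rw [show b * (1 + (m : Int)) + b = b * (1 + (m : Int)) + b from rfl]
    exact pv_block1 K n slots b (1 + (m : Int)) hb _

theorem pv_base2 (K : PySem.Set Int) (n slots b : Int) (hb : 1 ≤ b) (g : PySem.Set Int) :
    (PySem.List.pyRange 1 b).foldl (pvG2 K n slots b) g = g := by
  rw [PySem.List.foldl_congr_mem _ _ (fun acc _ => acc) _ ?_, PySem.List.foldl_ignore]
  intro acc x hx
  have hx' := PySem.List.mem_pyRange_one.mp hx
  have hfd : PySem.Int.floordiv x b = 0 := by
    have := pv_floordiv_block (b := b) (j := 0) (i := x) hb (by omega) (by omega)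
    simpa using this
  simp [pvG2, pvAct2, hfd]

theorem pv_main2 (K : PySem.Set Int) (n slots b : Int) (hb : 1 ≤ b) (m : Nat) (g : PySem.Set Int) :
    (PySem.List.pyRange 1 (b * (1 + (m : Int)))).foldl (pvG2 K n slots b) g
      = (PySem.List.pyRange 1 (1 + (m : Int))).foldl
          (fun g j => if (PySem.Set.contains K (b * j) || (PySem.List.pyRange 1 b).any (fun i => PySem.Set.contains K (b * j + i)))
                      then PySem.Set.add g (pvC n slots (b * j)) else g) g := by
  induction m generalizing g with
  | zero =>
    rw [show b * (1 + ((0 : Nat) : Int)) = b by push_cast; ring,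
        show (1 + ((0 : Nat) : Int)) = 1 by norm_num,
        PySem.List.pyRange_one_eq_nil (le_refl 1)]
    simp [pv_base2 K n slots b hb]
  | succ m ih =>
    have h1 : (1 : Int) ≤ b * (1 + (m : Int)) := by nlinarith [Int.natCast_nonneg m]
    rw [show b * (1 + ((m + 1 : Nat) : Int)) = b * (1 + (m : Int)) + b by push_cast; ring,
        PySem.List.pyRange_one_append 1 (b * (1 + (m : Int))) (b * (1 + (m : Int)) + b) h1 (by omega),
        List.foldl_append, ih,
        show (1 + ((m + 1 : Nat) : Int)) = (1 + (m : Int)) + 1 by push_cast; ring,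
        PySem.List.pyRange_one_succ_right (by omega : (1:Int) ≤ 1 + (m : Int)),
        List.foldl_append]
    simp only [List.foldl_cons, List.foldl_nil]
    exact pv_block2 K n slots b (1 + (m : Int)) hb (by omega) _


-- loop 1 of A is the guarded per-key baby action over the keys 1..b-1
theorem pv_base1 (K : PySem.Set Int) (n slots b : Int) (hb : 1 ≤ b) (s : PySem.Set Int) :
    (PySem.List.pyRange 1 b).foldl
        (fun baby i =>
          if PySem.Set.contains K i then
            PySem.Set.add baby (canonical_conj_index (norm_rot_index i n) slots)
          else baby) s
      = (PySem.List.pyRange 1 b).foldl (pvG1 K n slots b) s := by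
  apply PySem.List.foldl_congr_mem
  intro acc x hx
  have hx' := PySem.List.mem_pyRange_one.mp hx
  have hmod : PySem.Int.mod x b = x := by
    have := pv_mod_block (b := b) (j := 0) (i := x) hb (by omega) (by omega)
    simpa using this
  simp [pvG1, pvAct1, pvC, hmod, show ¬(x = 0) by omega]

-- A's nested loops compute the two guarded per-key folds over the whole candidate range
theorem pv_A_char (xs : List Int) (n slots b gs : Int) (hb : 1 ≤ b) (hgs : 1 ≤ gs) :
    List.foldl
      (fun (bg : PySem.Set Int × PySem.Set Int) j =>
        ((List.foldl
              (fun (bc : PySem.Set Int × Bool) i =>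
                if PySem.Set.contains (PySem.Set.ofList xs) (b * j + i) then
                  (PySem.Set.add bc.1 (canonical_conj_index (norm_rot_index i n) slots), true)
                else bc)
              (bg.1, PySem.Set.contains (PySem.Set.ofList xs) (b * j))
              (PySem.List.pyRange 1 b)).1,
          if (List.foldl
                (fun (bc : PySem.Set Int × Bool) i =>
                  if PySem.Set.contains (PySem.Set.ofList xs) (b * j + i) then
                    (PySem.Set.add bc.1 (canonical_conj_index (norm_rot_index i n) slots), true)
                  else bc)
                (bg.1, PySem.Set.contains (PySem.Set.ofList xs) (b * j))
                (PySem.List.pyRange 1 b)).2 = true then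
            PySem.Set.add bg.2 (canonical_conj_index (norm_rot_index (b * j) n) slots)
          else bg.2))
      (List.foldl
          (fun baby i =>
            if PySem.Set.contains (PySem.Set.ofList xs) i then
              PySem.Set.add baby (canonical_conj_index (norm_rot_index i n) slots)
            else baby)
          PySem.Set.empty (PySem.List.pyRange 1 b),
        PySem.Set.empty)
      (PySem.List.pyRange 1 gs)
    = ((PySem.List.pyRange 1 (b * gs)).foldl (pvG1 (PySem.Set.ofList xs) n slots b) PySem.Set.empty,
       (PySem.List.pyRange 1 (b * gs)).foldl (pvG2 (PySem.Set.ofList xs) n slots b) PySem.Set.empty) := by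
  obtain ⟨m, hm⟩ : ∃ m : Nat, gs = 1 + (m : Int) := ⟨(gs - 1).toNat, by omega⟩
  subst hm
  have hinner : ∀ (s : PySem.Set Int) (j : Int),
      List.foldl
        (fun (bc : PySem.Set Int × Bool) i =>
          if PySem.Set.contains (PySem.Set.ofList xs) (b * j + i) then
            (PySem.Set.add bc.1 (canonical_conj_index (norm_rot_index i n) slots), true)
          else bc)
        (s, PySem.Set.contains (PySem.Set.ofList xs) (b * j))
        (PySem.List.pyRange 1 b)
      = ((PySem.List.pyRange 1 b).foldl
            (fun s i => if PySem.Set.contains (PySem.Set.ofList xs) (b * j + i) then PySem.Set.add s (pvC n slots i) else s) s,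
         (PySem.Set.contains (PySem.Set.ofList xs) (b * j) ||
           (PySem.List.pyRange 1 b).any (fun i => PySem.Set.contains (PySem.Set.ofList xs) (b * j + i)))) := by
    intro s j
    calc
      List.foldl
        (fun (bc : PySem.Set Int × Bool) i =>
          if PySem.Set.contains (PySem.Set.ofList xs) (b * j + i) then
            (PySem.Set.add bc.1 (canonical_conj_index (norm_rot_index i n) slots), true)
          else bc)
        (s, PySem.Set.contains (PySem.Set.ofList xs) (b * j))
        (PySem.List.pyRange 1 b)
        = List.foldl
            (fun (bc : PySem.Set Int × Bool) i =>
              ((fun s i => if PySem.Set.contains (PySem.Set.ofList xs) (b * j + i) then PySem.Set.add s (pvC n slots i) else s) bc.1 i,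
               (fun ch i => if PySem.Set.contains (PySem.Set.ofList xs) (b * j + i) then true else ch) bc.2 i))
            (s, PySem.Set.contains (PySem.Set.ofList xs) (b * j))
            (PySem.List.pyRange 1 b) := by
          apply PySem.List.foldl_congr_mem
          intro acc x hx
          by_cases h : b * j + x ∈ xs <;>
            simp [h, pvC, PySem.Set.contains, List.contains_eq_mem]
      _ = ((PySem.List.pyRange 1 b).foldl
              (fun s i => if PySem.Set.contains (PySem.Set.ofList xs) (b * j + i) then PySem.Set.add s (pvC n slots i) else s) s,
           (PySem.List.pyRange 1 b).foldl
              (fun ch i => if PySem.Set.contains (PySem.Set.ofList xs) (b * j + i) then true else ch)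
              (PySem.Set.contains (PySem.Set.ofList xs) (b * j))) :=
          PySem.List.foldl_prod_mk
            (fun s i => if PySem.Set.contains (PySem.Set.ofList xs) (b * j + i) then PySem.Set.add s (pvC n slots i) else s)
            (fun ch i => if PySem.Set.contains (PySem.Set.ofList xs) (b * j + i) then true else ch) _ _ _
      _ = _ := by rw [PySem.List.foldl_if_true_eq]
  calc
    List.foldl
      (fun (bg : PySem.Set Int × PySem.Set Int) j =>
        ((List.foldl
              (fun (bc : PySem.Set Int × Bool) i =>
                if PySem.Set.contains (PySem.Set.ofList xs) (b * j + i) then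
                  (PySem.Set.add bc.1 (canonical_conj_index (norm_rot_index i n) slots), true)
                else bc)
              (bg.1, PySem.Set.contains (PySem.Set.ofList xs) (b * j))
              (PySem.List.pyRange 1 b)).1,
          if (List.foldl
                (fun (bc : PySem.Set Int × Bool) i =>
                  if PySem.Set.contains (PySem.Set.ofList xs) (b * j + i) then
                    (PySem.Set.add bc.1 (canonical_conj_index (norm_rot_index i n) slots), true)
                  else bc)
                (bg.1, PySem.Set.contains (PySem.Set.ofList xs) (b * j))
                (PySem.List.pyRange 1 b)).2 = true then
            PySem.Set.add bg.2 (canonical_conj_index (norm_rot_index (b * j) n) slots)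
          else bg.2))
      (List.foldl
          (fun baby i =>
            if PySem.Set.contains (PySem.Set.ofList xs) i then
              PySem.Set.add baby (canonical_conj_index (norm_rot_index i n) slots)
            else baby)
          PySem.Set.empty (PySem.List.pyRange 1 b),
        PySem.Set.empty)
      (PySem.List.pyRange 1 (1 + (m : Int)))
      = List.foldl
          (fun (bg : PySem.Set Int × PySem.Set Int) j =>
            ((fun s j => (PySem.List.pyRange 1 b).foldl
                (fun s i => if PySem.Set.contains (PySem.Set.ofList xs) (b * j + i) then PySem.Set.add s (pvC n slots i) else s) s) bg.1 j,
             (fun g j => if (PySem.Set.contains (PySem.Set.ofList xs) (b * j) ||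
                   (PySem.List.pyRange 1 b).any (fun i => PySem.Set.contains (PySem.Set.ofList xs) (b * j + i)))
                 then PySem.Set.add g (pvC n slots (b * j)) else g) bg.2 j))
          (List.foldl
              (fun baby i =>
                if PySem.Set.contains (PySem.Set.ofList xs) i then
                  PySem.Set.add baby (canonical_conj_index (norm_rot_index i n) slots)
                else baby)
              PySem.Set.empty (PySem.List.pyRange 1 b),
            PySem.Set.empty)
          (PySem.List.pyRange 1 (1 + (m : Int))) := by
        apply PySem.List.foldl_congr_mem
        intro acc j hj
        rw [hinner acc.1 j]
        simp [pvC]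
    _ = (List.foldl
            (fun s j => (PySem.List.pyRange 1 b).foldl
                (fun s i => if PySem.Set.contains (PySem.Set.ofList xs) (b * j + i) then PySem.Set.add s (pvC n slots i) else s) s)
            (List.foldl
                (fun baby i =>
                  if PySem.Set.contains (PySem.Set.ofList xs) i then
                    PySem.Set.add baby (canonical_conj_index (norm_rot_index i n) slots)
                  else baby)
                PySem.Set.empty (PySem.List.pyRange 1 b))
            (PySem.List.pyRange 1 (1 + (m : Int))),
         List.foldl
            (fun g j => if (PySem.Set.contains (PySem.Set.ofList xs) (b * j) ||
                  (PySem.List.pyRange 1 b).any (fun i => PySem.Set.contains (PySem.Set.ofList xs) (b * j + i)))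
                then PySem.Set.add g (pvC n slots (b * j)) else g)
            PySem.Set.empty
            (PySem.List.pyRange 1 (1 + (m : Int)))) :=
          PySem.List.foldl_prod_mk
            (fun s j => (PySem.List.pyRange 1 b).foldl
                (fun s i => if PySem.Set.contains (PySem.Set.ofList xs) (b * j + i) then PySem.Set.add s (pvC n slots i) else s) s)
            (fun g j => if (PySem.Set.contains (PySem.Set.ofList xs) (b * j) ||
                  (PySem.List.pyRange 1 b).any (fun i => PySem.Set.contains (PySem.Set.ofList xs) (b * j + i)))
                then PySem.Set.add g (pvC n slots (b * j)) else g) _ _ _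
    _ = _ := by
        rw [pv_base1 (PySem.Set.ofList xs) n slots b hb]
        rw [pv_main1 (PySem.Set.ofList xs) n slots b hb m, pv_main2 (PySem.Set.ofList xs) n slots b hb m]

-- the guarded per-key fold is the unguarded fold over the present keys only
theorem pv_G1_filter (K : PySem.Set Int) (n slots b N : Int) :
    (PySem.List.pyRange 1 N).foldl (pvG1 K n slots b) PySem.Set.empty
      = ((PySem.List.pyRange 1 N).filter (fun k => PySem.Set.contains K k)).foldl (pvAct1 n slots b) PySem.Set.empty := by
  exact PySem.List.foldl_if_eq_foldl_filter (fun k => PySem.Set.contains K k) (pvAct1 n slots b) _ _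

theorem pv_G2_filter (K : PySem.Set Int) (n slots b N : Int) :
    (PySem.List.pyRange 1 N).foldl (pvG2 K n slots b) PySem.Set.empty
      = ((PySem.List.pyRange 1 N).filter (fun k => PySem.Set.contains K k)).foldl (pvAct2 n slots b) PySem.Set.empty := by
  exact PySem.List.foldl_if_eq_foldl_filter (fun k => PySem.Set.contains K k) (pvAct2 n slots b) _ _

-- B's loop is the pair of unguarded folds over its filtered sorted key list
theorem pv_B_char (xs : List Int) (n slots b gs : Int) :
    List.foldl
      (fun (bg : PySem.Set Int × PySem.Set Int) k =>
        if k = 0 ∨ PySem.Int.floordiv k b < 0 ∨ gs ≤ PySem.Int.floordiv k b then bg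
        else
          ((if PySem.Int.mod k b = 0 then bg.1 else PySem.Set.add bg.1 (canonical_conj_index (norm_rot_index (PySem.Int.mod k b) n) slots)),
           (if PySem.Int.floordiv k b = 0 then bg.2 else PySem.Set.add bg.2 (canonical_conj_index (norm_rot_index (b * PySem.Int.floordiv k b) n) slots))))
      (PySem.Set.empty, PySem.Set.empty)
      (PySem.List.sorted (PySem.Set.ofList xs) (fun k => k))
    = (((PySem.List.sorted (PySem.Set.ofList xs) (fun k => k)).filter
          (fun k => decide ¬(k = 0 ∨ PySem.Int.floordiv k b < 0 ∨ gs ≤ PySem.Int.floordiv k b))).foldl (pvAct1 n slots b) PySem.Set.empty,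
       ((PySem.List.sorted (PySem.Set.ofList xs) (fun k => k)).filter
          (fun k => decide ¬(k = 0 ∨ PySem.Int.floordiv k b < 0 ∨ gs ≤ PySem.Int.floordiv k b))).foldl (pvAct2 n slots b) PySem.Set.empty) := by
  calc
    List.foldl
      (fun (bg : PySem.Set Int × PySem.Set Int) k =>
        if k = 0 ∨ PySem.Int.floordiv k b < 0 ∨ gs ≤ PySem.Int.floordiv k b then bg
        else
          ((if PySem.Int.mod k b = 0 then bg.1 else PySem.Set.add bg.1 (canonical_conj_index (norm_rot_index (PySem.Int.mod k b) n) slots)),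
           (if PySem.Int.floordiv k b = 0 then bg.2 else PySem.Set.add bg.2 (canonical_conj_index (norm_rot_index (b * PySem.Int.floordiv k b) n) slots))))
      (PySem.Set.empty, PySem.Set.empty)
      (PySem.List.sorted (PySem.Set.ofList xs) (fun k => k))
      = List.foldl
          (fun (bg : PySem.Set Int × PySem.Set Int) k =>
            ((fun s k => if ¬(k = 0 ∨ PySem.Int.floordiv k b < 0 ∨ gs ≤ PySem.Int.floordiv k b) then pvAct1 n slots b s k else s) bg.1 k,
             (fun s k => if ¬(k = 0 ∨ PySem.Int.floordiv k b < 0 ∨ gs ≤ PySem.Int.floordiv k b) then pvAct2 n slots b s k else s) bg.2 k))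
          (PySem.Set.empty, PySem.Set.empty)
          (PySem.List.sorted (PySem.Set.ofList xs) (fun k => k)) := by
        apply PySem.List.foldl_congr_mem
        intro acc k hk
        by_cases h : k = 0 ∨ PySem.Int.floordiv k b < 0 ∨ gs ≤ PySem.Int.floordiv k b <;>
          simp [h, pvAct1, pvAct2, pvC]
    _ = (List.foldl
            (fun s k => if ¬(k = 0 ∨ PySem.Int.floordiv k b < 0 ∨ gs ≤ PySem.Int.floordiv k b) then pvAct1 n slots b s k else s)
            PySem.Set.empty (PySem.List.sorted (PySem.Set.ofList xs) (fun k => k)),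
         List.foldl
            (fun s k => if ¬(k = 0 ∨ PySem.Int.floordiv k b < 0 ∨ gs ≤ PySem.Int.floordiv k b) then pvAct2 n slots b s k else s)
            PySem.Set.empty (PySem.List.sorted (PySem.Set.ofList xs) (fun k => k))) :=
          PySem.List.foldl_prod_mk
            (fun s k => if ¬(k = 0 ∨ PySem.Int.floordiv k b < 0 ∨ gs ≤ PySem.Int.floordiv k b) then pvAct1 n slots b s k else s)
            (fun s k => if ¬(k = 0 ∨ PySem.Int.floordiv k b < 0 ∨ gs ≤ PySem.Int.floordiv k b) then pvAct2 n slots b s k else s) _ _ _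
    _ = _ := by
        rw [PySem.List.foldl_ite_eq_foldl_filter
              (fun k => ¬(k = 0 ∨ PySem.Int.floordiv k b < 0 ∨ gs ≤ PySem.Int.floordiv k b)) (pvAct1 n slots b),
            PySem.List.foldl_ite_eq_foldl_filter
              (fun k => ¬(k = 0 ∨ PySem.Int.floordiv k b < 0 ∨ gs ≤ PySem.Int.floordiv k b)) (pvAct2 n slots b)]

-- the two filtered key lists coincide
theorem pv_filter_eq (xs : List Int) (b gs : Int) (hb : 1 ≤ b) (hpos : ∀ x ∈ xs, 0 ≤ x) :
    (PySem.List.pyRange 1 (b * gs)).filter (fun k => PySem.Set.contains (PySem.Set.ofList xs) k)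
      = (PySem.List.sorted (PySem.Set.ofList xs) (fun k => k)).filter
          (fun k => decide ¬(k = 0 ∨ PySem.Int.floordiv k b < 0 ∨ gs ≤ PySem.Int.floordiv k b)) := by
  have hp1 : ((PySem.List.pyRange 1 (b * gs)).filter (fun k => PySem.Set.contains (PySem.Set.ofList xs) k)).Pairwise (· < ·) :=
    List.Pairwise.sublist List.filter_sublist (PySem.List.pairwise_lt_pyRange_one 1 (b * gs))
  have hp2 : ((PySem.List.sorted (PySem.Set.ofList xs) (fun k => k)).filter
        (fun k => decide ¬(k = 0 ∨ PySem.Int.floordiv k b < 0 ∨ gs ≤ PySem.Int.floordiv k b))).Pairwise (· < ·) :=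
    List.Pairwise.sublist List.filter_sublist (PySem.List.sorted_ofList_pairwise_lt xs)
  have hmem : ∀ a : Int,
      (a ∈ (PySem.List.pyRange 1 (b * gs)).filter (fun k => PySem.Set.contains (PySem.Set.ofList xs) k))
        ↔ (a ∈ (PySem.List.sorted (PySem.Set.ofList xs) (fun k => k)).filter
            (fun k => decide ¬(k = 0 ∨ PySem.Int.floordiv k b < 0 ∨ gs ≤ PySem.Int.floordiv k b))) := by
    intro a
    simp only [List.mem_filter, PySem.List.mem_pyRange_one, PySem.Set.contains, List.contains_eq_mem,
      decide_eq_true_eq, (PySem.List.sorted_perm (PySem.Set.ofList xs) (fun k => k) false).mem_iff]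
    constructor
    · rintro ⟨⟨h1, h2⟩, h3⟩
      refine ⟨h3, ?_⟩
      have hfd0 : 0 ≤ PySem.Int.floordiv a b := by
        rw [PySem.Int.le_floordiv_iff_mul_le (by omega)]; omega
      have hfdlt : PySem.Int.floordiv a b < gs := by
        rw [PySem.Int.floordiv_lt_iff_lt_mul (by omega)]
        calc a < b * gs := h2
          _ = gs * b := mul_comm b gs
      push Not
      exact ⟨by omega, hfd0, hfdlt⟩
    · rintro ⟨h3, h4⟩
      push Not at h4
      obtain ⟨h0, hfd0, hfdlt⟩ := h4
      have ha0 : 0 ≤ a := hpos a ((PySem.Set.mem_ofList xs a).mp h3)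
      have halt : a < gs * b := by
        rw [← PySem.Int.floordiv_lt_iff_lt_mul (show (0:Int) < b by omega)]
        exact hfdlt
      exact ⟨⟨by omega, by rw [mul_comm]; exact halt⟩, h3⟩
  have hperm := (List.perm_ext_iff_of_nodup
      (hp1.imp (fun h => ne_of_lt h)) (hp2.imp (fun h => ne_of_lt h))).mpr hmem
  exact hperm.eq_of_pairwise (by intro a c _ _ hac hca; omega) hp1 hp2

-- the positive-step case: both ports reduce to the same two folds over the same filtered key list
theorem pv_pos_case (a_diags : List Int) (n b_step slots : Int) (hs : 1 ≤ slots) (hb : 1 ≤ b_step) :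
    collect_rotation_breakdown_structural_conj_py a_diags n b_step slots
      = collect_rotation_breakdown_structural_conj_py_alt a_diags n b_step slots := by
  have hpos : ∀ x ∈ a_diags.map (fun x => PySem.Int.band x (slots - 1)), 0 ≤ x := by
    intro x hx
    obtain ⟨y, hy, rfl⟩ := List.mem_map.mp hx
    rw [PySem.Int.band_comm]
    exact PySem.Int.band_nonneg_of_nonneg_left y (by omega)
  have hgs1 : 1 ≤ PySem.Int.floordiv (slots + b_step - 1) b_step := by
    rw [PySem.Int.le_floordiv_iff_mul_le (by omega)]; omega
  simp only [collect_rotation_breakdown_structural_conj_py, collect_rotation_breakdown_structural_conj_py_alt]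
  rw [pv_A_char (a_diags.map (fun x => PySem.Int.band x (slots - 1))) n slots b_step
        (PySem.Int.floordiv (slots + b_step - 1) b_step) hb hgs1]
  rw [pv_B_char (a_diags.map (fun x => PySem.Int.band x (slots - 1))) n slots b_step
        (PySem.Int.floordiv (slots + b_step - 1) b_step)]
  rw [pv_G1_filter, pv_G2_filter,
      pv_filter_eq (a_diags.map (fun x => PySem.Int.band x (slots - 1))) b_step
        (PySem.Int.floordiv (slots + b_step - 1) b_step) hb hpos]

-- the negative-step case: both ports return three empty sets
theorem pv_neg_case (a_diags : List Int) (n b_step slots : Int) (hs : 1 ≤ slots) (hb : b_step ≤ -1) :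
    collect_rotation_breakdown_structural_conj_py a_diags n b_step slots
      = collect_rotation_breakdown_structural_conj_py_alt a_diags n b_step slots := by
  have hgs : PySem.Int.floordiv (slots + b_step - 1) b_step ≤ 1 := by
    have h1 := PySem.Int.floordiv_mul_add_mod (slots + b_step - 1) b_step
    have h2 := PySem.Int.mod_neg_bounds (slots + b_step - 1) (show b_step < 0 by omega)
    by_contra h
    have hq2 : 2 ≤ PySem.Int.floordiv (slots + b_step - 1) b_step := by omega
    have hA : (PySem.Int.floordiv (slots + b_step - 1) b_step - 2) * b_step ≤ 0 :=
      mul_nonpos_of_nonneg_of_nonpos (by omega) (by omega)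
    rw [sub_mul] at hA
    linarith
  have e1 : PySem.List.pyRange 1 b_step = [] := PySem.List.pyRange_one_eq_nil (by omega)
  have e2 : PySem.List.pyRange 1 (PySem.Int.floordiv (slots + b_step - 1) b_step) = [] :=
    PySem.List.pyRange_one_eq_nil hgs
  have hBfold : List.foldl
      (fun (bg : PySem.Set Int × PySem.Set Int) k =>
        if k = 0 ∨ PySem.Int.floordiv k b_step < 0 ∨ PySem.Int.floordiv (slots + b_step - 1) b_step ≤ PySem.Int.floordiv k b_step then bg
        else
          ((if PySem.Int.mod k b_step = 0 then bg.1 else PySem.Set.add bg.1 (canonical_conj_index (norm_rot_index (PySem.Int.mod k b_step) n) slots)),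
           (if PySem.Int.floordiv k b_step = 0 then bg.2 else PySem.Set.add bg.2 (canonical_conj_index (norm_rot_index (b_step * PySem.Int.floordiv k b_step) n) slots))))
      (PySem.Set.empty, PySem.Set.empty)
      (PySem.List.sorted (PySem.Set.ofList (a_diags.map (fun x => PySem.Int.band x (slots - 1)))) (fun k => k))
      = (PySem.Set.empty, PySem.Set.empty) := by
    calc
      List.foldl
        (fun (bg : PySem.Set Int × PySem.Set Int) k =>
          if k = 0 ∨ PySem.Int.floordiv k b_step < 0 ∨ PySem.Int.floordiv (slots + b_step - 1) b_step ≤ PySem.Int.floordiv k b_step then bg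
          else
            ((if PySem.Int.mod k b_step = 0 then bg.1 else PySem.Set.add bg.1 (canonical_conj_index (norm_rot_index (PySem.Int.mod k b_step) n) slots)),
             (if PySem.Int.floordiv k b_step = 0 then bg.2 else PySem.Set.add bg.2 (canonical_conj_index (norm_rot_index (b_step * PySem.Int.floordiv k b_step) n) slots))))
        (PySem.Set.empty, PySem.Set.empty)
        (PySem.List.sorted (PySem.Set.ofList (a_diags.map (fun x => PySem.Int.band x (slots - 1)))) (fun k => k))
        = List.foldl (fun (acc : PySem.Set Int × PySem.Set Int) (_ : Int) => acc)
            (PySem.Set.empty, PySem.Set.empty)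
            (PySem.List.sorted (PySem.Set.ofList (a_diags.map (fun x => PySem.Int.band x (slots - 1)))) (fun k => k)) := by
          apply PySem.List.foldl_congr_mem
          intro acc k hk
          have hkm : k ∈ a_diags.map (fun x => PySem.Int.band x (slots - 1)) :=
            (PySem.Set.mem_ofList _ k).mp
              ((PySem.List.sorted_perm (PySem.Set.ofList (a_diags.map (fun x => PySem.Int.band x (slots - 1)))) (fun k => k) false).mem_iff.mp hk)
          have hk0 : 0 ≤ k := by
            obtain ⟨y, hy, rfl⟩ := List.mem_map.mp hkm
            rw [PySem.Int.band_comm]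
            exact PySem.Int.band_nonneg_of_nonneg_left y (by omega)
          by_cases hkz : k = 0
          · simp [hkz]
          · have hfd : PySem.Int.floordiv k b_step < 0 := by
              have h1 := PySem.Int.floordiv_mul_add_mod k b_step
              have h2 := PySem.Int.mod_neg_bounds k (show b_step < 0 by omega)
              by_contra hge
              have hk1 : 1 ≤ k := by omega
              have hnp : PySem.Int.floordiv k b_step * b_step ≤ 0 :=
                mul_nonpos_of_nonneg_of_nonpos (by omega) (by omega)
              linarith
            simp [hfd]
      _ = (PySem.Set.empty, PySem.Set.empty) := PySem.List.foldl_ignore _ _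
  simp only [collect_rotation_breakdown_structural_conj_py, collect_rotation_breakdown_structural_conj_py_alt]
  rw [e1, e2, hBfold]
  simp

-- ===== VERDICT (by name: the statement is the Claim_ definition above) =====
theorem collect_rotation_breakdown_structural_conj_py_spec : Claim_equal_collect_rotation_breakdown_structural_conj_py := by
  intro a_diags n b_step slots _ hpre
  obtain ⟨hs, hb⟩ := hpre
  unfold Spec_collect_rotation_breakdown_structural_conj_py
  rcases lt_or_gt_of_ne hb with h | h
  · exact pv_neg_case a_diags n b_step slots hs (by omega)
  · exact pv_pos_case a_diags n b_step slots hs (by omega)
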